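-- pv_equiv track=rewrite | github.com/S180231891/PaChong | Day16-线程池的使用.py | videoMd5
-- ===== SOURCE A (Python) =====
-- def videoMd5(video_url, cmd):
--     true_url = ""
--     s_list = str(video_url).split('/')
--     for i in range(0, len(s_list)):
--         if i < len(s_list) - 1:
--             true_url += s_list[i] + '/'
--         else:
--             ss_list = s_list[i].split('-')
--             for j in range(0, len(ss_list)):
--                 if j == 0:
--                     true_url += 'cont-' + cmd + '-'
--                 elif j == len(ss_list) - 1:
--                     true_url += ss_list[j]
--                 else:
--                     true_url += ss_list[j] + '-'
--     return true_url
-- ===== SOURCE B (Python) =====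
-- def videoMd5(video_url, cmd):
--     s = str(video_url)
--     prefix, sep, last = s.rpartition('/')
--     _, _, rest = last.partition('-')
--     return prefix + sep + 'cont-' + cmd + '-' + rest
-- ===== Notes on version B (the rewrite author's own statement) =====
-- stated objective: idiomatic
-- what changed: Replaced A's split('/')+split('-') with two nested index-driven loops that rebuild the URL piece by piece with a single rpartition('/')/partition('-') pair and one concatenation.
import Mathlib
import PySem

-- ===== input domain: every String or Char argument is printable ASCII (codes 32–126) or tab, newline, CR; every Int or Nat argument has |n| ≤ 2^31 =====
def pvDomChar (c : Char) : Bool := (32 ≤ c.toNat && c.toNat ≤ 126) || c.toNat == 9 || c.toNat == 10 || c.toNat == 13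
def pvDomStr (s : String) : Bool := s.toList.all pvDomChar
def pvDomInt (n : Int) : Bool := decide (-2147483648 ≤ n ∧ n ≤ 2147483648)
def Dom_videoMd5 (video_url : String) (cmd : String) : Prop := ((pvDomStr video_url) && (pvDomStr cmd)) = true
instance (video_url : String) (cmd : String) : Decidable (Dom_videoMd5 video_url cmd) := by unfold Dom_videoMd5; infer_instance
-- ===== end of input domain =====

-- B replaces A's two index loops by rpartition('/') / partition('-') and one concatenation (idiomatic); return values proved equal on all inputs.

-- ===== PORT A =====
-- literal transliteration of A; strings are carried as List Char (PySem.Chars level),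
-- str(video_url) on a str is the identity; true_url accumulates exactly A's pieces.
def videoMd5 (video_url : String) (cmd : String) : String :=
  let s_list := PySem.Chars.splitOn video_url.toList ['/']
  let n : Int := s_list.length
  let true_url : List Char := (PySem.List.pyRange 0 n).foldl (fun true_url i =>
    if i < n - 1 then
      true_url ++ PySem.List.pyGetD s_list i [] ++ ['/']
    else
      let ss_list := PySem.Chars.splitOn (PySem.List.pyGetD s_list i []) ['-']
      let m : Int := ss_list.length
      (PySem.List.pyRange 0 m).foldl (fun t j =>
        if j = 0 then t ++ ("cont-".toList ++ cmd.toList ++ ['-'])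
        else if j = m - 1 then t ++ PySem.List.pyGetD ss_list j []
        else t ++ PySem.List.pyGetD ss_list j [] ++ ['-']) true_url) []
  String.ofList true_url

-- ===== PORT B =====
-- s.rpartition(c) for a one-char separator: split at the LAST occurrence; ("","",s) if absent.
def rpartChar (c : Char) : List Char → (List Char × List Char × List Char)
  | [] => ([], [], [])
  | a :: r =>
    let (p, m, t) := rpartChar c r
    if m ≠ [] then (a :: p, m, t)
    else if a = c then ([], [c], r)
    else ([], [], a :: t)

-- s.partition(c) for a one-char separator: split at the FIRST occurrence; (s,"","") if absent.
def partChar (c : Char) : List Char → (List Char × List Char × List Char)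
  | [] => ([], [], [])
  | a :: r =>
    if a = c then ([], [c], r)
    else
      let (p, m, t) := partChar c r
      if m ≠ [] then (a :: p, m, t) else (a :: p, [], [])

def videoMd5_alt (video_url : String) (cmd : String) : String :=
  let s := video_url.toList
  let (pre, sep, last) := rpartChar '/' s
  let (_, _, rest) := partChar '-' last
  String.ofList (pre ++ sep ++ "cont-".toList ++ cmd.toList ++ ['-'] ++ rest)

-- ===== PRECONDITION & SPEC =====
def Spec_videoMd5 (video_url : String) (cmd : String) (out : String) : Prop := out = videoMd5_alt video_url cmd
instance (video_url : String) (cmd : String) (out : String) : Decidable (Spec_videoMd5 video_url cmd out) := by unfold Spec_videoMd5; infer_instance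

-- ===== CLAIM (what is proved, stated in full; the proofs are below) =====
def Claim_equal_videoMd5 : Prop := ∀ (video_url : String) (cmd : String), Dom_videoMd5 video_url cmd → Spec_videoMd5 video_url cmd (videoMd5 video_url cmd)

-- ===== LEMMAS AND PROOFS =====
def spl (c : Char) : List Char → List (List Char)
  | [] => [[]]
  | a :: r =>
    let ps := spl c r
    if a = c then [] :: ps else (a :: ps.headI) :: ps.tail

lemma spl_ne_nil (c : Char) (s : List Char) : spl c s ≠ [] := by
  cases s with
  | nil => simp [spl]
  | cons a r => simp only [spl]; split <;> simp

lemma cons_headI_tail_spl (c : Char) (s : List Char) : (spl c s).headI :: (spl c s).tail = spl c s := by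
  obtain ⟨h, t, hht⟩ := List.exists_cons_of_ne_nil (spl_ne_nil c s)
  rw [hht]; rfl

lemma go_eq (c : Char) : ∀ (fuel : Nat) (l cur : List Char) (acc : List (List Char)), l.length ≤ fuel →
    PySem.Chars.splitOn.go [c] fuel l cur acc
      = acc.reverse ++ ((cur.reverse ++ (spl c l).headI) :: (spl c l).tail) := by
  intro fuel
  induction fuel with
  | zero =>
    intro l cur acc h
    have : l = [] := by cases l <;> simp_all
    subst this
    simp [PySem.Chars.splitOn.go, spl]
  | succ fuel ih =>
    intro l cur acc h
    cases l with
    | nil => simp [PySem.Chars.splitOn.go, spl]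
    | cons a rest =>
      have hlen : rest.length ≤ fuel := by simpa using h
      by_cases hac : a = c
      · subst hac
        have step : PySem.Chars.splitOn.go [a] (fuel+1) (a::rest) cur acc
              = PySem.Chars.splitOn.go [a] fuel (List.drop 1 (a::rest)) [] (cur.reverse :: acc) := by
          simp only [PySem.Chars.splitOn.go]
          rw [if_pos (by simp [List.isPrefixOf])]
          simp
        rw [step]
        simp only [List.drop_one, List.tail_cons]
        rw [ih _ _ _ hlen]
        simp [spl, cons_headI_tail_spl]
      · have step : PySem.Chars.splitOn.go [c] (fuel+1) (a::rest) cur acc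
              = PySem.Chars.splitOn.go [c] fuel rest (a :: cur) acc := by
          simp only [PySem.Chars.splitOn.go]
          rw [if_neg (by simp [List.isPrefixOf, beq_iff_eq]; exact fun hh => hac hh.symm)]
        rw [step, ih _ _ _ hlen]
        simp [spl, hac]

def afterSep (c : Char) : List Char → List Char
  | [] => []
  | a :: r => if a = c then r else afterSep c r

lemma getLast!_cons_ne (x : List Char) {l : List (List Char)} (h : l ≠ []) :
    (x :: l).getLast! = l.getLast! := by
  cases l with
  | nil => exact absurd rfl h
  | cons b t => simp [List.getLast!_eq_getLast?_getD, List.getLast?_cons_cons]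

lemma spl_cons_sep (c : Char) (r : List Char) : spl c (c :: r) = [] :: spl c r := by
  simp [spl]

lemma spl_cons_ne (c a : Char) (r : List Char) (hac : ¬ a = c) :
    spl c (a :: r) = (a :: (spl c r).headI) :: (spl c r).tail := by
  simp [spl, hac]

lemma join_spl (c : Char) (s : List Char) :
    ((spl c s).dropLast).flatMap (fun x => x ++ [c]) ++ (spl c s).getLast! = s := by
  induction s with
  | nil => simp [spl, List.getLast!_eq_getLast?_getD]
  | cons a r ih =>
    by_cases hac : a = c
    · subst hac
      rw [spl_cons_sep, List.dropLast_cons_of_ne_nil (spl_ne_nil a r),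
        getLast!_cons_ne _ (spl_ne_nil a r)]
      simpa using ih
    · rw [spl_cons_ne c a r hac]
      obtain ⟨h, t, hht⟩ := List.exists_cons_of_ne_nil (spl_ne_nil c r)
      rw [hht] at ih ⊢
      cases t with
      | nil => simpa [List.getLast!_eq_getLast?_getD] using congrArg (a :: ·) ih
      | cons t0 ts =>
        simp only [List.headI, List.tail_cons] at *
        rw [List.dropLast_cons_of_ne_nil (by simp), getLast!_cons_ne _ (by simp)] at ih ⊢
        simpa using congrArg (a :: ·) ih

lemma afterSep_eq (c : Char) (t : List Char) :
    (if (spl c t).tail = [] then ([] : List Char)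
     else ((spl c t).dropLast.drop 1).flatMap (fun x => x ++ [c]) ++ (spl c t).getLast!)
      = afterSep c t := by
  induction t with
  | nil => simp [spl, afterSep]
  | cons a r ih =>
    by_cases hac : a = c
    · subst hac
      rw [spl_cons_sep]
      simp only [List.tail_cons, afterSep]
      rw [if_neg (spl_ne_nil a r), List.dropLast_cons_of_ne_nil (spl_ne_nil a r),
        getLast!_cons_ne _ (spl_ne_nil a r)]
      simpa using join_spl a r
    · rw [spl_cons_ne c a r hac]
      obtain ⟨h, t, hht⟩ := List.exists_cons_of_ne_nil (spl_ne_nil c r)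
      rw [hht] at ih ⊢
      simp only [afterSep, if_neg hac]
      cases t with
      | nil => simpa using ih
      | cons t0 ts =>
        simp only [List.headI, List.tail_cons] at *
        rw [if_neg (by simp)] at ih ⊢
        rw [List.dropLast_cons_of_ne_nil (by simp), getLast!_cons_ne _ (by simp)] at ih ⊢
        simpa using ih


lemma part_spec (c : Char) (s : List Char) :
    (partChar c s).2.2 = afterSep c s ∧ ((partChar c s).2.1 = [] → afterSep c s = []) := by
  induction s with
  | nil => simp [partChar, afterSep]
  | cons a r ih =>
    by_cases hac : a = c
    · subst hac
      simp [partChar, afterSep]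
    · obtain ⟨ih1, ih2⟩ := ih
      by_cases hm : (partChar c r).2.1 = []
      · simp [partChar, afterSep, hac, hm, ih2 hm]
      · simp [partChar, afterSep, hac, hm, ih1]

lemma rpart_spec (c : Char) (s : List Char) :
    ((rpartChar c s).2.1 = [] ↔ (spl c s).tail = [])
    ∧ (rpartChar c s).1 ++ (rpartChar c s).2.1 = ((spl c s).dropLast).flatMap (fun x => x ++ [c])
    ∧ (rpartChar c s).2.2 = (spl c s).getLast! := by
  induction s with
  | nil => simp [rpartChar, spl, List.getLast!_eq_getLast?_getD]
  | cons a r ih =>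
    obtain ⟨ih1, ih2, ih3⟩ := ih
    by_cases hm : (rpartChar c r).2.1 = []
    · have htail : (spl c r).tail = [] := ih1.mp hm
      obtain ⟨h, t, hht⟩ := List.exists_cons_of_ne_nil (spl_ne_nil c r)
      have ht : t = [] := by rw [hht] at htail; simpa using htail
      subst ht
      have hr : h = r := by
        have := join_spl c r
        rw [hht] at this
        simpa [List.getLast!_eq_getLast?_getD] using this
      subst hr
      by_cases hac : a = c
      · subst hac
        rw [spl_cons_sep, hht]
        simp [rpartChar, hm, List.getLast!_eq_getLast?_getD]
      · rw [spl_cons_ne c a _ hac, hht]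
        have h22 : (rpartChar c h).2.2 = h := by
          rw [ih3, hht]; simp [List.getLast!_eq_getLast?_getD]
        simp [rpartChar, hm, hac, h22, List.getLast!_eq_getLast?_getD]
    · have htail : (spl c r).tail ≠ [] := fun hh => hm (ih1.mpr hh)
      obtain ⟨h, t, hht⟩ := List.exists_cons_of_ne_nil (spl_ne_nil c r)
      have ht : t ≠ [] := by rw [hht] at htail; simpa using htail
      obtain ⟨t0, ts, hts⟩ := List.exists_cons_of_ne_nil ht
      subst hts
      by_cases hac : a = c
      · subst hac
        rw [spl_cons_sep, hht]
        rw [hht] at ih2 ih3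
        simp only [rpartChar, if_pos (by simpa using hm)]
        refine ⟨by simp [hm], ?_, ?_⟩
        · rw [List.dropLast_cons_of_ne_nil (by simp)]
          rw [List.dropLast_cons_of_ne_nil (by simp)] at ih2
          simpa using ih2
        · rw [getLast!_cons_ne _ (by simp)]
          rw [getLast!_cons_ne _ (by simp)] at ih3
          simpa using ih3
      · rw [spl_cons_ne c a _ hac, hht]
        rw [hht] at ih2 ih3
        simp only [rpartChar, if_pos (by simpa using hm), List.headI, List.tail_cons]
        refine ⟨by simp [hm], ?_, ?_⟩
        · rw [List.dropLast_cons_of_ne_nil (by simp)]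
          rw [List.dropLast_cons_of_ne_nil (by simp)] at ih2
          simp at ih2 ⊢
          simp [ih2]
        · rw [getLast!_cons_ne _ (by simp)]
          rw [getLast!_cons_ne _ (by simp)] at ih3
          simpa using ih3

lemma pyGetD_last (l : List (List Char)) (h : l ≠ []) :
    PySem.List.pyGetD l ((l.length:Int) - 1) [] = l.getLast! := by
  have hlen : 0 < l.length := List.length_pos_iff.mpr h
  rw [PySem.List.pyGetD_eq_getElem _ _ (by omega) (by omega)]
  simp only [show ((l.length:Int) - 1).toNat = l.length - 1 by omega]
  rw [List.getLast!_eq_getLast?_getD, List.getLast?_eq_getElem?]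
  simp [List.getElem?_eq_getElem (show l.length - 1 < l.length by omega)]

lemma prefix_fold (l : List (List Char)) (d : Char) (a : Int) (ha : 0 ≤ a) (acc : List Char) :
    (PySem.List.pyRange a (l.length : Int)).foldl
      (fun u j => u ++ PySem.List.pyGetD l j [] ++ [d]) acc
    = acc ++ (l.drop a.toNat).flatMap (fun x => x ++ [d]) := by
  have h1 : (PySem.List.pyRange a (l.length : Int)).foldl
      (fun u j => u ++ PySem.List.pyGetD l j [] ++ [d]) acc
      = (PySem.List.pyRange a (PySem.List.len l)).foldl
      (fun u j => (fun v seg => v ++ (seg ++ [d])) u (PySem.List.pyGetD l j [])) acc := by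
    apply PySem.List.foldl_congr_mem
    intro u x _
    simp
  rw [h1, PySem.List.foldl_pyRange_pyGetD l [] (fun v seg => v ++ (seg ++ [d])) acc ha,
    PySem.List.foldl_append_eq_flatMap]

lemma inner_fold (mid : List Char) (d : Char) (l : List (List Char)) (hl : l ≠ []) (acc : List Char) :
    (PySem.List.pyRange 0 (l.length : Int)).foldl (fun u j =>
      if j = 0 then u ++ mid
      else if j = (l.length : Int) - 1 then u ++ PySem.List.pyGetD l j []
      else u ++ PySem.List.pyGetD l j [] ++ [d]) acc
    = acc ++ mid ++ (if l.tail = [] then [] else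
        (l.dropLast.drop 1).flatMap (fun x => x ++ [d]) ++ l.getLast!) := by
  have hlen : 0 < l.length := List.length_pos_iff.mpr hl
  by_cases h1 : l.tail = []
  · obtain ⟨x, hx⟩ : ∃ x, l = [x] := by
      cases l with
      | nil => exact absurd rfl hl
      | cons a t =>
        cases t with
        | nil => exact ⟨a, rfl⟩
        | cons b u => simp at h1
    subst hx
    rw [show ((([x]:List (List Char)).length : Int)) = 1 by simp]
    rw [show PySem.List.pyRange (0:Int) 1 = [0] from by decide]
    simp
  · have hge2 : 2 ≤ l.length := by
      cases l with
      | nil => exact absurd rfl hl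
      | cons a t =>
        cases t with
        | nil => simp at h1
        | cons b u => simp
    have hn2 : (2:Int) ≤ (l.length : Int) := by exact_mod_cast hge2
    rw [PySem.List.pyRange_one_append 0 1 (l.length : Int) (by omega) (by omega)]
    rw [show PySem.List.pyRange 1 (l.length : Int)
          = PySem.List.pyRange 1 ((l.length : Int) - 1) ++ [(l.length : Int) - 1] from by
      rw [← PySem.List.pyRange_one_succ_right (show (1:Int) ≤ (l.length : Int) - 1 by omega)]
      norm_num]
    rw [List.foldl_append, List.foldl_append]
    rw [show PySem.List.pyRange (0:Int) 1 = [0] from by decide]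
    simp only [List.foldl_cons, List.foldl_nil]
    have hmidfold : ∀ (u : List Char),
        (PySem.List.pyRange 1 ((l.length : Int) - 1)).foldl (fun u j =>
          if j = 0 then u ++ mid
          else if j = (l.length : Int) - 1 then u ++ PySem.List.pyGetD l j []
          else u ++ PySem.List.pyGetD l j [] ++ [d]) u
        = u ++ (l.dropLast.drop 1).flatMap (fun x => x ++ [d]) := by
      intro u
      have hcongr : (PySem.List.pyRange 1 ((l.length : Int) - 1)).foldl (fun u j =>
          if j = 0 then u ++ mid
          else if j = (l.length : Int) - 1 then u ++ PySem.List.pyGetD l j []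
          else u ++ PySem.List.pyGetD l j [] ++ [d]) u
          = (PySem.List.pyRange 1 ((l.length : Int) - 1)).foldl (fun u j =>
            u ++ PySem.List.pyGetD l.dropLast j [] ++ [d]) u := by
        apply PySem.List.foldl_congr_mem
        intro v j hj
        rw [PySem.List.mem_pyRange_one] at hj
        rw [if_neg (by omega), if_neg (by omega)]
        have hb1 : (0:Int) ≤ j := by omega
        have hb2 : j < (l.length : Int) := by omega
        have hb3 : j < (l.dropLast.length : Int) := by
          rw [List.length_dropLast]; omega
        rw [PySem.List.pyGetD_eq_getElem _ _ hb1 hb2,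
          PySem.List.pyGetD_eq_getElem _ _ hb1 hb3]
        simp [List.getElem_dropLast]
      rw [hcongr]
      have hlen' : ((l.length : Int) - 1) = (l.dropLast.length : Int) := by
        rw [List.length_dropLast]; omega
      rw [hlen', prefix_fold l.dropLast d 1 (by omega) u]
      norm_num
    simp only [if_true]
    rw [if_neg (show ¬((l.length : Int) - 1 = 0) by omega)]
    rw [hmidfold, pyGetD_last l hl, if_neg h1]
    simp [List.append_assoc]

lemma splitOn_eq_spl (c : Char) (s : List Char) : PySem.Chars.splitOn s [c] = spl c s := by
  obtain ⟨h, t, hht⟩ := List.exists_cons_of_ne_nil (spl_ne_nil c s)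
  simp [PySem.Chars.splitOn, go_eq c (s.length + 1) s [] [] (by omega), hht]

lemma outer_full (cmd : String) (l : List (List Char)) (hl : l ≠ []) :
    (PySem.List.pyRange 0 (l.length : Int)).foldl (fun true_url i =>
      if i < (l.length : Int) - 1 then true_url ++ PySem.List.pyGetD l i [] ++ ['/']
      else
        (PySem.List.pyRange 0 ((spl '-' (PySem.List.pyGetD l i [])).length : Int)).foldl (fun t j =>
          if j = 0 then t ++ ("cont-".toList ++ cmd.toList ++ ['-'])
          else if j = ((spl '-' (PySem.List.pyGetD l i [])).length : Int) - 1 then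
            t ++ PySem.List.pyGetD (spl '-' (PySem.List.pyGetD l i [])) j []
          else t ++ PySem.List.pyGetD (spl '-' (PySem.List.pyGetD l i [])) j [] ++ ['-']) true_url) []
    = l.dropLast.flatMap (fun x => x ++ ['/']) ++ ("cont-".toList ++ cmd.toList ++ ['-'])
      ++ afterSep '-' l.getLast! := by
  have hlen : 0 < l.length := List.length_pos_iff.mpr hl
  by_cases hone : l.length = 1
  · obtain ⟨x, hx⟩ : ∃ x, l = [x] := by
      cases l with
      | nil => exact absurd rfl hl
      | cons a t =>
        cases t with
        | nil => exact ⟨a, rfl⟩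
        | cons b u => simp at hone
    subst hx
    rw [show ((([x] : List (List Char)).length : Int)) = 1 by simp]
    rw [show PySem.List.pyRange (0:Int) 1 = [0] from by decide]
    simp only [List.foldl_cons, List.foldl_nil]
    rw [if_neg (by norm_num)]
    rw [show PySem.List.pyGetD [x] (0:Int) [] = x from by
      rw [PySem.List.pyGetD_eq_getElem _ _ (by norm_num) (by simp)]; simp]
    rw [inner_fold _ '-' (spl '-' x) (spl_ne_nil _ _) [], afterSep_eq]
    simp [List.getLast!_eq_getLast?_getD]
  · have hge2 : 2 ≤ l.length := by omega
    have hn2 : (2:Int) ≤ (l.length : Int) := by exact_mod_cast hge2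
    rw [PySem.List.pyRange_one_append 0 ((l.length : Int) - 1) (l.length : Int) (by omega) (by omega)]
    rw [List.foldl_append]
    have hprefix :
        (PySem.List.pyRange 0 ((l.length : Int) - 1)).foldl (fun true_url i =>
          if i < (l.length : Int) - 1 then true_url ++ PySem.List.pyGetD l i [] ++ ['/']
          else
            (PySem.List.pyRange 0 ((spl '-' (PySem.List.pyGetD l i [])).length : Int)).foldl (fun t j =>
              if j = 0 then t ++ ("cont-".toList ++ cmd.toList ++ ['-'])
              else if j = ((spl '-' (PySem.List.pyGetD l i [])).length : Int) - 1 then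
                t ++ PySem.List.pyGetD (spl '-' (PySem.List.pyGetD l i [])) j []
              else t ++ PySem.List.pyGetD (spl '-' (PySem.List.pyGetD l i [])) j [] ++ ['-']) true_url) []
        = l.dropLast.flatMap (fun x => x ++ ['/']) := by
      have hcongr :
          (PySem.List.pyRange 0 ((l.length : Int) - 1)).foldl (fun true_url i =>
            if i < (l.length : Int) - 1 then true_url ++ PySem.List.pyGetD l i [] ++ ['/']
            else
              (PySem.List.pyRange 0 ((spl '-' (PySem.List.pyGetD l i [])).length : Int)).foldl (fun t j =>
                if j = 0 then t ++ ("cont-".toList ++ cmd.toList ++ ['-'])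
                else if j = ((spl '-' (PySem.List.pyGetD l i [])).length : Int) - 1 then
                  t ++ PySem.List.pyGetD (spl '-' (PySem.List.pyGetD l i [])) j []
                else t ++ PySem.List.pyGetD (spl '-' (PySem.List.pyGetD l i [])) j [] ++ ['-']) true_url) []
          = (PySem.List.pyRange 0 ((l.length : Int) - 1)).foldl (fun u i =>
              u ++ PySem.List.pyGetD l.dropLast i [] ++ ['/']) [] := by
        apply PySem.List.foldl_congr_mem
        intro v j hj
        rw [PySem.List.mem_pyRange_one] at hj
        rw [if_pos (by omega)]
        have hb1 : (0:Int) ≤ j := by omega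
        have hb2 : j < (l.length : Int) := by omega
        have hb3 : j < (l.dropLast.length : Int) := by
          rw [List.length_dropLast]; omega
        rw [PySem.List.pyGetD_eq_getElem _ _ hb1 hb2,
          PySem.List.pyGetD_eq_getElem _ _ hb1 hb3]
        simp [List.getElem_dropLast]
      rw [hcongr]
      have hlen' : ((l.length : Int) - 1) = (l.dropLast.length : Int) := by
        rw [List.length_dropLast]; omega
      rw [hlen', prefix_fold l.dropLast '/' 0 le_rfl []]
      simp
    rw [hprefix]
    rw [show PySem.List.pyRange ((l.length : Int) - 1) (l.length : Int)
          = [(l.length : Int) - 1] from by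
      rw [show (l.length : Int) = ((l.length : Int) - 1) + 1 by ring,
        PySem.List.pyRange_one_cons (by omega)]
      norm_num]
    simp only [List.foldl_cons, List.foldl_nil]
    rw [if_neg (by omega)]
    rw [pyGetD_last l hl]
    rw [inner_fold _ '-' (spl '-' l.getLast!) (spl_ne_nil _ _), afterSep_eq]

lemma a_closed (s cmd : String) : videoMd5 s cmd = String.ofList (
    ((spl '/' s.toList).dropLast).flatMap (fun x => x ++ ['/'])
    ++ ("cont-".toList ++ cmd.toList ++ ['-'])
    ++ afterSep '-' ((spl '/' s.toList).getLast!)) := by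
  unfold videoMd5
  simp only [splitOn_eq_spl]
  exact congrArg String.ofList (outer_full cmd (spl '/' s.toList) (spl_ne_nil _ _))

lemma b_closed (s cmd : String) : videoMd5_alt s cmd = String.ofList (
    ((spl '/' s.toList).dropLast).flatMap (fun x => x ++ ['/'])
    ++ ("cont-".toList ++ cmd.toList ++ ['-'])
    ++ afterSep '-' ((spl '/' s.toList).getLast!)) := by
  unfold videoMd5_alt
  obtain ⟨h1, h2, h3⟩ := rpart_spec '/' s.toList
  rcases hA : rpartChar '/' s.toList with ⟨p, mm, t⟩
  obtain ⟨h4, h5⟩ := part_spec '-' t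
  rcases hB : partChar '-' t with ⟨q, w, rest⟩
  rw [hA] at h1 h2 h3
  rw [hB] at h4 h5
  simp only at h2 h3 h4
  rw [h3] at h4
  dsimp only
  rw [hA]
  dsimp only
  rw [hB]
  dsimp only
  apply congrArg String.ofList
  simp only [← List.append_assoc, h2, h4]

-- ===== VERDICT (by name: the statement is the Claim_ definition above) =====
theorem videoMd5_spec : Claim_equal_videoMd5 := by
  intro s cmd _
  unfold Spec_videoMd5
  rw [a_closed, b_closed]
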